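-- pv_equiv track=rewrite | github.com/ninepig/leecode_dd_2024 | zAmazon/oa/intenr/keyboardClickMin.py | findMinimumKeypadClickCount
-- ===== SOURCE A (Python) =====
-- from collections import defaultdict
--
-- def findMinimumKeypadClickCount(letters: str) -> int:
--   map = defaultdict(int)
--   for i in letters:
--     map[i] += 1
--
--   sort_map = sorted(map.items(), key = lambda x: -x[1])
--   res = 0
--   for i in range(len(sort_map)):
--     if i>=0 and i <=8:
--       res += 1*sort_map[i][1]
--     elif i>8 and i <=17:
--       res += 2*sort_map[i][1]
--     else:
--       res += 3*sort_map[i][1]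
--   return res
-- ===== SOURCE B (Python) =====
-- def findMinimumKeypadClickCount(letters: str) -> int:
--     freq = {}
--     for ch in letters:
--         freq[ch] = freq.get(ch, 0) + 1
--     # bounded selection: keep only the up-to-18 largest frequencies (ascending),
--     # by ordered insertion into a capped list -- the full list is never sorted
--     top = []
--     for f in freq.values():
--         i = 0
--         while i < len(top) and top[i] < f:
--             i += 1
--         top.insert(i, f)
--         if len(top) > 18:
--             top.pop(0)
--     # every click costs 3; the 9 most frequent keys earn a 2-click discount,
--     # the next 9 a 1-click discount
--     cut = max(0, len(top) - 9)
--     return 3 * len(letters) - 2 * sum(top[cut:]) - sum(top[:cut])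
-- ===== Notes on version B (the rewrite author's own statement) =====
-- stated objective: alternative
-- what changed: Replaces A's full comparison sort of (char,count) items plus a rank-bucketed weighting loop with a bounded selection (ordered insertion into a list capped at the 18 largest frequencies, never sorting all of them) and a complement formulation: 3 clicks per keypress minus a 2-click discount for the 9 most frequent keys and a 1-click discount for the next 9.
import Mathlib
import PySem

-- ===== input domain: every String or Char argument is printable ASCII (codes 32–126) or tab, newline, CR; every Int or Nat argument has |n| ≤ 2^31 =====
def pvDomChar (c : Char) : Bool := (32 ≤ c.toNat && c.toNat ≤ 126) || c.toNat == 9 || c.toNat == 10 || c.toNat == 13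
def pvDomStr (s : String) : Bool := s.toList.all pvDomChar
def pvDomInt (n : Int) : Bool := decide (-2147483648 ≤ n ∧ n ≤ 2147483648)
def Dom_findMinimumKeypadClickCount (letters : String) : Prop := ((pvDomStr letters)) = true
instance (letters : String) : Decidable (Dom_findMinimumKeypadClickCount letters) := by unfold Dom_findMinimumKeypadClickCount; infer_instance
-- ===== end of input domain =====

-- B replaces A's full sort + rank-bucketed weighting by a bounded selection of the 18
-- largest frequencies (ordered insertion into a capped list) and a discount formula
-- (3 clicks per keypress minus discounts for the 18 most frequent keys); objective: alternative.

-- ===== PORT A =====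
def findMinimumKeypadClickCount (letters : String) : Int :=
  -- map = defaultdict(int); for i in letters: map[i] += 1
  let map : PySem.Dict Char Int :=
    letters.toList.foldl (fun d i => d.modify i 0 (· + 1)) PySem.Dict.empty
  -- sort_map = sorted(map.items(), key=lambda x: -x[1])
  let sortMap := PySem.List.sorted map.items (fun x => -x.2)
  -- res = 0; for i in range(len(sort_map)): bucketed weights
  (PySem.List.pyRange 0 (PySem.List.len sortMap) 1).foldl
    (fun res i =>
      if 0 ≤ i ∧ i ≤ 8 then res + 1 * (PySem.List.pyGetD sortMap i (' ', 0)).2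
      else if 8 < i ∧ i ≤ 17 then res + 2 * (PySem.List.pyGetD sortMap i (' ', 0)).2
      else res + 3 * (PySem.List.pyGetD sortMap i (' ', 0)).2) 0

-- ===== PORT B =====
-- i = 0; while i < len(top) and top[i] < f: i += 1   (the scan for the insertion index)
def pvInsPos : List Int → Int → Nat
  | [], _ => 0
  | t :: ts, f => if t < f then pvInsPos ts f + 1 else 0

-- one iteration of B's selection loop: top.insert(i, f); if len(top) > 18: top.pop(0)
def pvStep (top : List Int) (f : Int) : List Int :=
  let top' := PySem.List.insert top ((pvInsPos top f : Nat) : Int) f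
  if 18 < top'.length then top'.tail else top'   -- top.pop(0) on this nonempty list drops the head: exact

def findMinimumKeypadClickCount_alt (letters : String) : Int :=
  -- freq = {}; for ch in letters: freq[ch] = freq.get(ch, 0) + 1
  let freq : PySem.Dict Char Int :=
    letters.toList.foldl (fun d ch => d.insert ch (d.getD ch 0 + 1)) PySem.Dict.empty
  -- bounded selection of the up-to-18 largest frequencies, kept ascending
  let top := freq.values.foldl pvStep []
  -- cut = max(0, len(top) - 9): Nat subtraction is exactly Python's max(0, ·) here
  let cut := top.length - 9
  -- 3 * len(letters) - 2 * sum(top[cut:]) - sum(top[:cut])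
  3 * (PySem.Str.len letters : Int) - 2 * (top.drop cut).sum - (top.take cut).sum

-- ===== PRECONDITION & SPEC =====
def Spec_findMinimumKeypadClickCount (letters : String) (out : Int) : Prop := out = findMinimumKeypadClickCount_alt letters
instance (letters : String) (out : Int) : Decidable (Spec_findMinimumKeypadClickCount letters out) := by unfold Spec_findMinimumKeypadClickCount; infer_instance

-- ===== CLAIM (what is proved, stated in full; the proofs are below) =====
def Claim_equal_findMinimumKeypadClickCount : Prop := ∀ (letters : String), Dom_findMinimumKeypadClickCount letters → Spec_findMinimumKeypadClickCount letters (findMinimumKeypadClickCount letters)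

-- ===== LEMMAS AND PROOFS =====

-- ---- proof-side ghost structures: ordered insertion, descending ----

-- ascending ordered insert (the effect of pvInsPos + list.insert)
def pvAscIns (f : Int) : List Int → List Int
  | [] => [f]
  | a :: t => if a < f then a :: pvAscIns f t else f :: a :: t

-- descending ordered insert (after the maximal ≥-f prefix)
def pvDescIns (f : Int) : List Int → List Int
  | [] => [f]
  | a :: t => if f ≤ a then a :: pvDescIns f t else f :: a :: t

-- length of the maximal ≥-f prefix
def pvDpos (f : Int) : List Int → Nat
  | [] => 0
  | a :: t => if f ≤ a then pvDpos f t + 1 else 0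

-- ---- small facts ----

theorem pvInsPos_le (top : List Int) (f : Int) : pvInsPos top f ≤ top.length := by
  induction top with
  | nil => simp [pvInsPos]
  | cons a t ih => simp only [pvInsPos, List.length_cons]; split <;> omega

theorem pvInsert_eq_ascIns (top : List Int) (f : Int) :
    PySem.List.insert top ((pvInsPos top f : Nat) : Int) f = pvAscIns f top := by
  induction top with
  | nil => simp [pvInsPos, pvAscIns, PySem.List.insert_zero]
  | cons a t ih =>
    by_cases h : a < f
    · have hle : pvInsPos t f ≤ t.length := pvInsPos_le t f
      rw [pvInsPos, if_pos h, PySem.List.insert_natCast _ _ _ (by simpa using Nat.succ_le_succ hle)]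
      rw [PySem.List.insert_natCast _ _ _ hle] at ih
      simp [pvAscIns, h, ← ih]
    · rw [pvInsPos, if_neg h]
      simp [PySem.List.insert_zero, pvAscIns, h]

theorem pvAscIns_length (f : Int) (t : List Int) : (pvAscIns f t).length = t.length + 1 := by
  induction t with
  | nil => simp [pvAscIns]
  | cons a t ih => simp only [pvAscIns]; split <;> simp [ih]

theorem pvAscIns_perm (f : Int) (t : List Int) : (pvAscIns f t).Perm (f :: t) := by
  induction t with
  | nil => simp [pvAscIns]
  | cons a t ih =>
    simp only [pvAscIns]; split
    · exact ((ih.cons a).trans (List.Perm.swap f a t))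
    · exact List.Perm.refl _

theorem pvAscIns_mem {x f : Int} {t : List Int} (h : x ∈ pvAscIns f t) : x = f ∨ x ∈ t := by
  have := (pvAscIns_perm f t).mem_iff.mp h
  simpa using this

theorem pvAscIns_asc (f : Int) (t : List Int) (h : t.Pairwise (· ≤ ·)) :
    (pvAscIns f t).Pairwise (· ≤ ·) := by
  induction t with
  | nil => simp [pvAscIns]
  | cons a t ih =>
    rcases List.pairwise_cons.mp h with ⟨ha, ht⟩
    simp only [pvAscIns]; split
    · refine List.pairwise_cons.mpr ⟨?_, ih ht⟩
      intro x hx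
      rcases pvAscIns_mem hx with rfl | hxt
      · omega
      · exact ha x hxt
    · refine List.pairwise_cons.mpr ⟨?_, h⟩
      intro x hx
      rcases List.mem_cons.mp hx with rfl | hxt
      · omega
      · exact le_trans (by omega) (ha x hxt)

theorem pvDescIns_perm (f : Int) (t : List Int) : (pvDescIns f t).Perm (f :: t) := by
  induction t with
  | nil => simp [pvDescIns]
  | cons a t ih =>
    simp only [pvDescIns]; split
    · exact ((ih.cons a).trans (List.Perm.swap f a t))
    · exact List.Perm.refl _

theorem pvDescIns_mem {x f : Int} {t : List Int} (h : x ∈ pvDescIns f t) : x = f ∨ x ∈ t := by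
  have := (pvDescIns_perm f t).mem_iff.mp h
  simpa using this

theorem pvDescIns_desc (f : Int) (t : List Int) (h : t.Pairwise (fun a b => b ≤ a)) :
    (pvDescIns f t).Pairwise (fun a b => b ≤ a) := by
  induction t with
  | nil => simp [pvDescIns]
  | cons a t ih =>
    rcases List.pairwise_cons.mp h with ⟨ha, ht⟩
    simp only [pvDescIns]; split
    · refine List.pairwise_cons.mpr ⟨?_, ih ht⟩
      intro x hx
      rcases pvDescIns_mem hx with rfl | hxt
      · omega
      · exact ha x hxt
    · refine List.pairwise_cons.mpr ⟨?_, h⟩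
      intro x hx
      rcases List.mem_cons.mp hx with rfl | hxt
      · omega
      · exact le_trans (ha x hxt) (by omega)

theorem pvDescIns_eq_take_drop (f : Int) (s : List Int) :
    pvDescIns f s = s.take (pvDpos f s) ++ f :: s.drop (pvDpos f s) := by
  induction s with
  | nil => simp [pvDescIns, pvDpos]
  | cons a t ih =>
    simp only [pvDescIns, pvDpos]; split
    · simp [ih]
    · simp

theorem pvDpos_le (f : Int) (s : List Int) : pvDpos f s ≤ s.length := by
  induction s with
  | nil => simp [pvDpos]
  | cons a t ih => simp only [pvDpos, List.length_cons]; split <;> omega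

theorem pvDpos_prefix_ge (f : Int) (s : List Int) : ∀ x ∈ s.take (pvDpos f s), f ≤ x := by
  induction s with
  | nil => simp [pvDpos]
  | cons a t ih =>
    simp only [pvDpos]; split
    · intro x hx
      rcases List.mem_cons.mp (by simpa using hx) with rfl | hxt
      · omega
      · exact ih x hxt
    · simp

theorem pvDpos_ge_of_take (f : Int) (s : List Int) (k : Nat) (hk : k ≤ s.length)
    (h : ∀ x ∈ s.take k, f ≤ x) : k ≤ pvDpos f s := by
  induction s generalizing k with
  | nil => simp only [List.length_nil, Nat.le_zero] at hk; simp [pvDpos, hk]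
  | cons a t ih =>
    cases k with
    | zero => omega
    | succ k =>
      have ha : f ≤ a := h a (by simp)
      simp only [pvDpos, if_pos ha]
      have := ih k (by simpa using hk) (fun x hx => h x (by simpa using Or.inr hx))
      omega

-- take k of a descending insert, when f lands inside the first k slots
theorem pvTake_descIns_of_lt (f : Int) (s : List Int) (k : Nat) (hk : pvDpos f s < k) :
    ((pvDescIns f s).take k).Perm (f :: s.take (k - 1)) := by
  have hple := pvDpos_le f s
  set p := pvDpos f s with hp
  rw [pvDescIns_eq_take_drop, ← hp, List.take_append]
  have hlen : (s.take p).length = p := List.length_take_of_le hple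
  rw [List.take_of_length_le (by omega), hlen]
  have h2 : k - p = (k - p - 1) + 1 := by omega
  rw [h2, List.take_succ_cons]
  have h3 : s.take (k - 1) = s.take p ++ (s.drop p).take (k - 1 - p) := by
    have hh : p + (k - 1 - p) = k - 1 := by omega
    rw [← hh, List.take_add]
    have h5 : p + (k - 1 - p) - p = k - 1 - p := by omega
    simp [h5]
  rw [h3]
  have h4 : k - p - 1 = k - 1 - p := by omega
  rw [h4]
  exact List.perm_middle

-- take k of a descending insert, when f lands beyond the first k slots
theorem pvTake_descIns_of_ge (f : Int) (s : List Int) (k : Nat) (hk : k ≤ pvDpos f s) :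
    (pvDescIns f s).take k = s.take k := by
  rw [pvDescIns_eq_take_drop, List.take_append]
  have hlen : (s.take (pvDpos f s)).length = pvDpos f s := List.length_take_of_le (pvDpos_le f s)
  rw [hlen, Nat.sub_eq_zero_of_le hk, List.take_zero, List.append_nil, List.take_take,
    Nat.min_eq_left hk]

-- two ascending lists with the same multiset are equal
theorem pvUniqAsc (u v : List Int) (hp : u.Perm v)
    (hu : u.Pairwise (· ≤ ·)) (hv : v.Pairwise (· ≤ ·)) : u = v :=
  PySem.List.eq_of_perm_of_pairwise_le_of_injective (fun x : Int => x)
    (fun _ _ h => h) hp hu hv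

-- two descending lists with the same multiset are equal
theorem pvUniqDesc (u v : List Int) (hp : u.Perm v)
    (hu : u.Pairwise (fun a b => b ≤ a)) (hv : v.Pairwise (fun a b => b ≤ a)) : u = v :=
  PySem.List.eq_of_perm_of_pairwise_le_of_injective (fun x : Int => -x)
    neg_injective hp (hu.imp fun h => neg_le_neg h) (hv.imp fun h => neg_le_neg h)

-- the last element of a descending list is its minimum
theorem pvDescGetLast_le (u : List Int) (h : u ≠ []) (hd : u.Pairwise (fun a b => b ≤ a)) :
    ∀ x ∈ u, u.getLast h ≤ x := by
  induction u with
  | nil => simp at h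
  | cons a t ih =>
    intro x hx
    cases t with
    | nil =>
      rcases List.mem_cons.mp hx with rfl | hxt
      · simp [List.getLast]
      · simp at hxt
    | cons b t2 =>
      rcases List.pairwise_cons.mp hd with ⟨ha, ht⟩
      rw [List.getLast_cons (by simp)]
      rcases List.mem_cons.mp hx with rfl | hxt
      · exact ha _ (List.getLast_mem (by simp))
      · exact ih (by simp) ht x hxt

-- ---- the main step lemma: pvStep maintains "reverse of the 18 largest, descending" ----

theorem pvStep_eq (s : List Int) (hs : s.Pairwise (fun a b => b ≤ a)) (f : Int) :
    pvStep ((s.take 18).reverse) f = ((pvDescIns f s).take 18).reverse := by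
  have hinsdesc : (pvDescIns f s).Pairwise (fun a b => b ≤ a) := pvDescIns_desc f s hs
  have hRHSasc : (((pvDescIns f s).take 18).reverse).Pairwise (· ≤ ·) := by
    rw [List.pairwise_reverse]; exact hinsdesc.take
  simp only [pvStep]
  rw [pvInsert_eq_ascIns]
  by_cases hn : s.length < 18
  · have hts : s.take 18 = s := List.take_of_length_le (by omega)
    rw [hts]
    have hlen : (pvAscIns f s.reverse).length = s.length + 1 := by
      rw [pvAscIns_length]; simp
    have hcond : ¬ (18 < (pvAscIns f s.reverse).length) := by rw [hlen]; omega
    rw [if_neg hcond]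
    have hlen2 : (pvDescIns f s).length = s.length + 1 :=
      (pvDescIns_perm f s).length_eq.trans (by simp)
    have hRt : (pvDescIns f s).take 18 = pvDescIns f s := List.take_of_length_le (by omega)
    rw [hRt]
    apply pvUniqAsc
    · refine (pvAscIns_perm f s.reverse).trans ?_
      refine ((s.reverse_perm).cons f).trans ?_
      exact (pvDescIns_perm f s).symm.trans ((pvDescIns f s).reverse_perm).symm
    · exact pvAscIns_asc f s.reverse (by rw [List.pairwise_reverse]; exact hs)
    · rw [List.pairwise_reverse]; exact hinsdesc
  · rw [Nat.not_lt] at hn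
    set u := s.take 18 with hu
    have hulen : u.length = 18 := by rw [hu, List.length_take]; omega
    have hune : u ≠ [] := by intro h; rw [h] at hulen; simp at hulen
    have hudesc : u.Pairwise (fun a b => b ≤ a) := hs.take
    have hrev : u.reverse = u.getLast hune :: u.dropLast.reverse := by
      conv_lhs => rw [← List.dropLast_concat_getLast hune]
      rw [List.reverse_append]; rfl
    have hlenai : (pvAscIns f u.reverse).length = 19 := by
      rw [pvAscIns_length]; simp [hulen]
    rw [if_pos (by rw [hlenai]; omega)]
    rw [hrev]
    have hdldesc : u.dropLast.Pairwise (fun a b => b ≤ a) := by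
      rw [List.dropLast_eq_take]; exact hudesc.take
    by_cases haf : u.getLast hune < f
    · simp only [pvAscIns, if_pos haf, List.tail_cons]
      have hdl : u.dropLast = s.take 17 := by
        rw [List.dropLast_eq_take, hulen, hu, List.take_take]
        norm_num
      have hdlt : pvDpos f s < 18 := by
        by_contra hge
        rw [Nat.not_lt] at hge
        obtain ⟨x, hxu, hxeq⟩ : ∃ x, x ∈ u ∧ x = u.getLast hune :=
          ⟨_, List.getLast_mem hune, rfl⟩
        have he : u = (s.take (pvDpos f s)).take 18 := by
          rw [hu, List.take_take, Nat.min_eq_left hge]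
        rw [he] at hxu
        have := pvDpos_prefix_ge f s x (List.take_subset _ _ hxu)
        omega
      have hperm := pvTake_descIns_of_lt f s 18 hdlt
      apply pvUniqAsc
      · refine (pvAscIns_perm f _).trans ?_
        have h1 : (f :: u.dropLast.reverse).Perm (f :: s.take 17) := by
          refine List.Perm.cons f ?_
          rw [hdl] at *
          exact (s.take 17).reverse_perm
        refine h1.trans ?_
        exact (hperm.symm).trans ((pvDescIns f s).take 18).reverse_perm.symm
      · exact pvAscIns_asc f _ (by rw [List.pairwise_reverse]; exact hdldesc)
      · exact hRHSasc
    · simp only [pvAscIns, if_neg haf, List.tail_cons]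
      have hge : 18 ≤ pvDpos f s := by
        apply pvDpos_ge_of_take f s 18 (by omega)
        intro x hx
        have hax : u.getLast hune ≤ x := pvDescGetLast_le u hune hudesc x (by rw [hu]; exact hx)
        omega
      rw [pvTake_descIns_of_ge f s 18 hge, ← hu, hrev]

-- the whole selection loop
theorem pvLoop_eq (vs : List Int) : ∀ (s : List Int), s.Pairwise (fun a b => b ≤ a) →
    vs.foldl pvStep ((s.take 18).reverse)
      = ((vs.foldl (fun s f => pvDescIns f s) s).take 18).reverse := by
  induction vs with
  | nil => intro s _; rfl
  | cons f vs ih =>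
    intro s hs
    simp only [List.foldl_cons]
    rw [pvStep_eq s hs f]
    exact ih _ (pvDescIns_desc f s hs)

-- folded descending insertion permutes the input
theorem pvFold_perm (vs : List Int) : ∀ (s : List Int),
    (vs.foldl (fun s f => pvDescIns f s) s).Perm (s ++ vs) := by
  induction vs with
  | nil => intro s; simp
  | cons f vs ih =>
    intro s
    simp only [List.foldl_cons]
    refine (ih (pvDescIns f s)).trans ?_
    refine ((pvDescIns_perm f s).append_right vs).trans ?_
    simpa using List.perm_middle.symm

-- folded descending insertion stays descending
theorem pvFold_desc (vs : List Int) : ∀ (s : List Int), s.Pairwise (fun a b => b ≤ a) →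
    (vs.foldl (fun s f => pvDescIns f s) s).Pairwise (fun a b => b ≤ a) := by
  induction vs with
  | nil => intro s hs; exact hs
  | cons f vs ih =>
    intro s hs
    simp only [List.foldl_cons]
    exact ih _ (pvDescIns_desc f s hs)

-- repeated descending insertion IS Python's sorted(·, reverse=True)
theorem pvFoldDescIns_eq_sorted (vs : List Int) :
    vs.foldl (fun s f => pvDescIns f s) [] = PySem.List.sorted vs (fun x => x) true := by
  apply pvUniqDesc
  · have h := pvFold_perm vs []
    simp only [List.nil_append] at h
    exact h.trans (PySem.List.sorted_perm vs (fun x => x) true).symm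
  · exact pvFold_desc vs [] (by simp)
  · exact PySem.List.sorted_pairwise_rev vs (fun x => x)

-- sum of counts over a nodup support covering l
theorem pvSumCountOver (l : List Char) : ∀ (dd : List Char), dd.Nodup → (∀ y ∈ l, y ∈ dd) →
    (dd.map (fun k => (l.count k : Int))).sum = (l.length : Int) := by
  induction l with
  | nil => intro dd _ _; simp
  | cons x l ih =>
    intro dd hnd hsub
    have hx : x ∈ dd := hsub x (by simp)
    have hmapeq : dd.map (fun k => ((x :: l).count k : Int))
        = dd.map (fun k => (l.count k : Int) + (if k == x then (1 : Int) else 0)) := by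
      refine List.map_congr_left fun k _ => ?_
      by_cases hkx : k = x
      · subst hkx
        simp
      · simp [hkx, Ne.symm hkx]
    rw [hmapeq, PySem.List.sum_map_add_int,
      ih dd hnd (fun y hy => hsub y (by simp [hy]))]
    have hind : (dd.map (fun k => if k == x then (1 : Int) else 0)).sum = 1 := by
      rw [PySem.List.sum_map_ite_one_zero]
      have : dd.countP (fun k => k == x) = dd.count x := rfl
      rw [this, List.count_eq_one_of_mem hnd hx]
      rfl
    rw [hind, List.length_cons]
    push_cast
    ring

-- sum of Counter values = length of the counted list
theorem pvSumCounterValues (l : List Char) :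
    ((PySem.Dict.counter l).values).sum = (l.length : Int) := by
  have hv : (PySem.Dict.counter l).values
      = (PySem.Set.ofList l).map (fun k => (l.count k : Int)) := by
    have : (PySem.Dict.counter l).values = ((PySem.Dict.counter l).items).map (·.2) := rfl
    rw [this, PySem.Dict.items_counter, List.map_map]
    rfl
  rw [hv]
  exact pvSumCountOver l (PySem.Set.ofList l) (PySem.Set.nodup_ofList l)
    (fun y hy => (PySem.Set.mem_ofList l y).mpr hy)

-- A's bucketed loop, seen over an enumeration starting at k, is three suffix sums.
theorem pvLoopLemma {α : Type} (g : α → Int) :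
    ∀ (vs : List α) (k : Nat) (acc : Int),
      List.foldl
        (fun res p =>
          if 0 ≤ p.1 ∧ p.1 ≤ 8 then res + 1 * g p.2
          else if 8 < p.1 ∧ p.1 ≤ 17 then res + 2 * g p.2
          else res + 3 * g p.2) acc (PySem.List.enumerate vs (k : Int))
      = acc + (vs.map g).sum + ((vs.map g).drop (9 - k)).sum + ((vs.map g).drop (18 - k)).sum := by
  intro vs
  induction vs with
  | nil => intro k acc; simp [PySem.List.enumerate_nil]
  | cons v vs ih =>
    intro k acc
    rw [PySem.List.enumerate_cons]
    have hk1 : (k : Int) + 1 = ((k + 1 : Nat) : Int) := by push_cast; ring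
    simp only [List.foldl_cons, hk1, ih (k + 1)]
    by_cases h1 : k ≤ 8
    · have e9 : 9 - k = (8 - k) + 1 := by omega
      have e18 : 18 - k = (17 - k) + 1 := by omega
      have e9' : 9 - (k + 1) = 8 - k := by omega
      have e18' : 18 - (k + 1) = 17 - k := by omega
      have hc : (0 : Int) ≤ (k : Int) ∧ (k : Int) ≤ 8 := by constructor <;> [positivity; exact_mod_cast h1]
      rw [if_pos hc]
      simp only [List.map_cons, e9, e18, e9', e18', List.drop_succ_cons, List.sum_cons]
      ring
    · by_cases h2 : k ≤ 17
      · have e9 : 9 - k = 0 := by omega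
        have e9' : 9 - (k + 1) = 0 := by omega
        have e18 : 18 - k = (17 - k) + 1 := by omega
        have e18' : 18 - (k + 1) = 17 - k := by omega
        have hc1 : ¬ ((0 : Int) ≤ (k : Int) ∧ (k : Int) ≤ 8) := by
          intro h; exact h1 (by exact_mod_cast h.2)
        have hc2 : (8 : Int) < (k : Int) ∧ (k : Int) ≤ 17 := by
          constructor <;> [exact_mod_cast Nat.lt_of_lt_of_le (by omega) (le_refl k); exact_mod_cast h2]
        rw [if_neg hc1, if_pos hc2]
        simp only [List.map_cons, e9, e9', e18, e18', List.drop_succ_cons, List.drop_zero, List.sum_cons]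
        ring
      · have e9 : 9 - k = 0 := by omega
        have e9' : 9 - (k + 1) = 0 := by omega
        have e18 : 18 - k = 0 := by omega
        have e18' : 18 - (k + 1) = 0 := by omega
        have hc1 : ¬ ((0 : Int) ≤ (k : Int) ∧ (k : Int) ≤ 8) := by
          intro h; exact h1 (by exact_mod_cast h.2)
        have hc2 : ¬ ((8 : Int) < (k : Int) ∧ (k : Int) ≤ 17) := by
          intro h; exact h2 (by exact_mod_cast h.2)
        rw [if_neg hc1, if_neg hc2]
        simp only [List.map_cons, e9, e9', e18, e18', List.drop_zero, List.sum_cons]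
        ring

-- the frequency column of A's sorted items IS the reverse-sorted value list
theorem pvMapSorted (items : List (Char × Int)) :
    (PySem.List.sorted items (fun x => -x.2)).map (·.2)
      = PySem.List.sorted (items.map (·.2)) (fun x => x) true := by
  apply PySem.List.eq_of_perm_of_pairwise_le_of_injective (key := fun x : Int => -x) neg_injective
  · exact ((PySem.List.sorted_perm items (fun x => -x.2) false).map (·.2)).trans
      (PySem.List.sorted_perm (items.map (·.2)) (fun x => x) true).symm
  · exact List.Pairwise.map (S := fun a b : Int => -a ≤ -b) (fun x : Char × Int => x.2)
      (fun a b h => h) (PySem.List.sorted_pairwise items (fun x => -x.2))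
  · exact (PySem.List.sorted_pairwise_rev (items.map (·.2)) (fun x => x)).imp
      (fun h => neg_le_neg h)

-- A's value as three suffix sums of the descending frequency list
theorem pvA_char (letters : String) :
    findMinimumKeypadClickCount letters
      = (PySem.List.sorted (PySem.Dict.counter letters.toList).values (fun x => x) true).sum
        + ((PySem.List.sorted (PySem.Dict.counter letters.toList).values (fun x => x) true).drop 9).sum
        + ((PySem.List.sorted (PySem.Dict.counter letters.toList).values (fun x => x) true).drop 18).sum := by
  unfold findMinimumKeypadClickCount
  rw [← PySem.Dict.counter_eq_foldl]
  set m := PySem.Dict.counter letters.toList with hm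
  set sortMap := PySem.List.sorted m.items (fun x => -x.2) with hs
  have henum := PySem.List.enumerate_eq_map_pyRange sortMap (' ', 0)
  have hfold :
      (PySem.List.pyRange 0 (PySem.List.len sortMap) 1).foldl
        (fun res i =>
          if 0 ≤ i ∧ i ≤ 8 then res + 1 * (PySem.List.pyGetD sortMap i (' ', 0)).2
          else if 8 < i ∧ i ≤ 17 then res + 2 * (PySem.List.pyGetD sortMap i (' ', 0)).2
          else res + 3 * (PySem.List.pyGetD sortMap i (' ', 0)).2) 0
      = List.foldl
          (fun res p =>
            if 0 ≤ p.1 ∧ p.1 ≤ 8 then res + 1 * (fun q : Char × Int => q.2) p.2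
            else if 8 < p.1 ∧ p.1 ≤ 17 then res + 2 * (fun q : Char × Int => q.2) p.2
            else res + 3 * (fun q : Char × Int => q.2) p.2) 0
          (PySem.List.enumerate sortMap ((0 : Nat) : Int)) := by
    rw [show (((0 : Nat) : Int)) = (0 : Int) from rfl, henum, List.foldl_map]
  rw [hfold, pvLoopLemma]
  have hvals : m.values = m.items.map (·.2) := rfl
  rw [hvals, ← pvMapSorted m.items, ← hs]
  simp

-- ===== VERDICT (by name: the statement is the Claim_ definition above) =====
theorem findMinimumKeypadClickCount_spec : Claim_equal_findMinimumKeypadClickCount := by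
  intro letters _
  unfold Spec_findMinimumKeypadClickCount
  rw [pvA_char]
  set s := PySem.List.sorted (PySem.Dict.counter letters.toList).values (fun x => x) true with hsdef
  have hsdesc : s.Pairwise (fun a b => b ≤ a) :=
    PySem.List.sorted_pairwise_rev (PySem.Dict.counter letters.toList).values (fun x => x)
  set u := s.take 18 with hu
  have htop : (PySem.Dict.counter letters.toList).values.foldl pvStep [] = u.reverse := by
    have h0 := pvLoop_eq (PySem.Dict.counter letters.toList).values [] (by simp)
    simpa [pvFoldDescIns_eq_sorted, ← hsdef, ← hu] using h0
  have hB : findMinimumKeypadClickCount_alt letters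
      = 3 * (PySem.Str.len letters : Int)
        - 2 * ((u.reverse).drop ((u.reverse).length - 9)).sum
        - ((u.reverse).take ((u.reverse).length - 9)).sum := by
    unfold findMinimumKeypadClickCount_alt
    simp only [PySem.Dict.foldl_insert_getD_add_one_eq_counter, htop]
  rw [hB]
  have hulen : u.length = min 18 s.length := by rw [hu, List.length_take]
  have htake9 : u.take (u.length - (u.length - 9)) = s.take 9 := by
    by_cases h9 : 9 ≤ u.length
    · have h1 : u.length - (u.length - 9) = 9 := by omega
      rw [h1, hu, List.take_take]
      norm_num
    · rw [Nat.not_le] at h9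
      have hsl : s.length < 9 := by omega
      have h1 : u.length - (u.length - 9) = u.length := by omega
      rw [h1, List.take_of_length_le (le_refl _), hu,
        List.take_of_length_le (by omega), List.take_of_length_le (by omega)]
  have hdrop : ((u.reverse).drop ((u.reverse).length - 9)).sum = (s.take 9).sum := by
    rw [List.length_reverse, List.drop_reverse, List.sum_reverse, htake9]
  have htake : ((u.reverse).take ((u.reverse).length - 9)).sum = u.sum - (s.take 9).sum := by
    have hsplit := List.sum_take_add_sum_drop u.reverse ((u.reverse).length - 9)
    rw [hdrop, List.sum_reverse] at hsplit
    omega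
  have hsum9 : (s.take 9).sum + (s.drop 9).sum = s.sum := by
    rw [← List.sum_append, List.take_append_drop]
  have hsum18 : u.sum + (s.drop 18).sum = s.sum := by
    rw [hu, ← List.sum_append, List.take_append_drop]
  have hL : (PySem.Str.len letters : Int) = s.sum := by
    have hperm : s.Perm (PySem.Dict.counter letters.toList).values :=
      PySem.List.sorted_perm _ _ _
    rw [hperm.sum_eq, pvSumCounterValues]
    simp [PySem.Str.len_eq]
  rw [hdrop, htake, hL]
  linarith
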